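-- pv_equiv track=rewrite | github.com/wojmichaluk/AdPTO_2024_2025 | lab1/sol.py | choose_vertex
-- ===== SOURCE A (Python) =====
-- def choose_vertex(G):
--     high = 0
--     best_v = None
--
--     for v, ns in enumerate(G):
--         if len(ns) == 1:
--             return v, 1
--
--         if len(ns) > high:
--             high = len(ns)
--             best_v = v
--
--     return best_v, high
-- ===== SOURCE B (Python) =====
-- def choose_vertex(G):
--     # Build the degree table once, then answer with list primitives:
--     # first degree-1 vertex if any, else first vertex of maximal positive degree.
--     degs = [len(ns) for ns in G]
--     if 1 in degs:
--         return degs.index(1), 1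
--     m = max(degs, default=0)
--     if m == 0:
--         return None, 0
--     return degs.index(m), m
-- ===== Notes on version B (the rewrite author's own statement) =====
-- stated objective: alternative
-- what changed: Replaces A's fused accumulator loop (early return plus running max/argmax state) with a degree table queried by list primitives: membership + index for the degree-1 case, max + index for the max-degree case.
import Mathlib
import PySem

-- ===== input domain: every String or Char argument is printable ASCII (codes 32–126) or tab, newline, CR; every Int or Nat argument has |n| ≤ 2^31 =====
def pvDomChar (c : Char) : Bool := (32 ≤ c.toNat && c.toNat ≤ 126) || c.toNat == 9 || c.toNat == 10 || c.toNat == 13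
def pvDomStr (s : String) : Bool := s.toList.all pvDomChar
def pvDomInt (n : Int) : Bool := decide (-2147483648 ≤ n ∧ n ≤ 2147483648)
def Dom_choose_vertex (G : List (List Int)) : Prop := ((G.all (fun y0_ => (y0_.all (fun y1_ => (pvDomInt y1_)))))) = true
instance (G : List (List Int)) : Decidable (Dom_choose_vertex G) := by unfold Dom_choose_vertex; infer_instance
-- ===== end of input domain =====

-- B replaces A's fused accumulator loop with a degree table queried by list
-- primitives (membership/index for degree 1, max/index otherwise); same cost.

-- ===== PORT A =====
-- A's single loop: state (v, high, best_v), early return on a degree-1 vertex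
def chooseVertexLoop : List (List Int) → Int → Int → Option Int → Option Int × Int
  | [], _, high, best => (best, high)
  | ns :: rest, v, high, best =>
    if ns.length = 1 then (some v, 1)
    else if (ns.length : Int) > high then chooseVertexLoop rest (v + 1) (ns.length : Int) (some v)
    else chooseVertexLoop rest (v + 1) high best

def choose_vertex (G : List (List Int)) : Option Int × Int :=
  chooseVertexLoop G 0 0 none

-- ===== PORT B =====
def choose_vertex_alt (G : List (List Int)) : Option Int × Int :=
  let degs : List Int := G.map (fun ns => (ns.length : Int))
  if (1 : Int) ∈ degs then
    ((PySem.List.index? degs 1).map Int.ofNat, 1)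
  else
    let m : Int := (PySem.List.max? degs (fun d => d)).getD 0
    if m = 0 then (none, 0)
    else ((PySem.List.index? degs m).map Int.ofNat, m)

-- ===== PRECONDITION & SPEC =====
def Spec_choose_vertex (G : List (List Int)) (out : Option Int × Int) : Prop := out = choose_vertex_alt G
instance (G : List (List Int)) (out : Option Int × Int) : Decidable (Spec_choose_vertex G out) := by unfold Spec_choose_vertex; infer_instance

-- ===== CLAIM (what is proved, stated in full; the proofs are below) =====
def Claim_equal_choose_vertex : Prop := ∀ (G : List (List Int)), Dom_choose_vertex G → Spec_choose_vertex G (choose_vertex G)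


-- ===== LEMMAS AND PROOFS =====
-- proof-only helper: A's loop with the degree-1 early return already discharged
def maxPass : List (List Int) → Int → Int → Option Int → Option Int × Int
  | [], _, high, best => (best, high)
  | ns :: rest, v, high, best =>
    if (ns.length : Int) > high then maxPass rest (v + 1) (ns.length : Int) (some v)
    else maxPass rest (v + 1) high best

-- A's fused loop equals: the first degree-1 vertex if any, else the pure max pass.
theorem chooseVertexLoop_split (l : List (List Int)) :
    ∀ (v high : Int) (best : Option Int),
      chooseVertexLoop l v high best =
        match PySem.List.index? (l.map (fun ns => ((ns.length : Int)))) 1 with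
        | some k => (some (v + (k : Int)), 1)
        | none => maxPass l v high best := by
  induction l with
  | nil => intro v high best; simp [chooseVertexLoop, PySem.List.index?, maxPass]
  | cons ns rest ih =>
    intro v high best
    by_cases h1 : ns.length = 1
    · have : ((ns.length : Int)) = 1 := by exact_mod_cast h1
      simp only [List.map_cons, this, PySem.List.index?_cons_self]
      simp [chooseVertexLoop, h1]
    · have hne : ((ns.length : Int)) ≠ 1 := by exact_mod_cast h1
      simp only [List.map_cons, PySem.List.index?_cons_of_ne _ hne]
      cases hidx : PySem.List.index? (rest.map (fun ns => ((ns.length : Int)))) 1 with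
      | none =>
        have ih' : ∀ (v high : Int) (best : Option Int),
            chooseVertexLoop rest v high best = maxPass rest v high best :=
          fun v high best => (ih v high best).trans (by rw [hidx])
        simp only [hidx, Option.map_none]
        by_cases hgt : (ns.length : Int) > high <;>
          simp [chooseVertexLoop, maxPass, h1, hgt, ih']
      | some k =>
        have ih' : ∀ (v high : Int) (best : Option Int),
            chooseVertexLoop rest v high best = (some (v + (k : Int)), 1) :=
          fun v high best => (ih v high best).trans (by rw [hidx])
        simp only [hidx, Option.map_some]
        by_cases hgt : (ns.length : Int) > high <;>
          · simp [chooseVertexLoop, h1, hgt, ih']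
            push_cast; omega
-- the max pass returns the first index attaining the running maximum (strict-> update)
theorem maxPass_char (l : List (List Int)) :
    ∀ (v high : Int) (best : Option Int), 0 ≤ high →
      maxPass l v high best =
        (if (l.map (fun ns => ((ns.length : Int)))).foldl max high ≤ high then (best, high)
         else ((PySem.List.index? (l.map (fun ns => ((ns.length : Int))))
                  ((l.map (fun ns => ((ns.length : Int)))).foldl max high)).map
                 (fun k => v + (k : Int)),
               (l.map (fun ns => ((ns.length : Int)))).foldl max high)) := by
  induction l with
  | nil => intro v high best h0; simp [maxPass]
  | cons ns rest ih =>
    intro v high best h0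
    have hd0 : (0 : Int) ≤ (ns.length : Int) := Int.ofNat_nonneg _
    by_cases hgt : (ns.length : Int) > high
    · have hmx : max high ((ns.length : Int)) = (ns.length : Int) := by omega
      have hdM : (ns.length : Int) ≤
          (rest.map (fun ns => ((ns.length : Int)))).foldl max (ns.length : Int) :=
        (PySem.List.le_foldl_max _ _).1
      simp only [maxPass, if_pos hgt, List.map_cons, List.foldl_cons, hmx]
      rw [ih (v + 1) (ns.length : Int) (some v) hd0]
      by_cases hMd : (rest.map (fun ns => ((ns.length : Int)))).foldl max (ns.length : Int)
          ≤ (ns.length : Int)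
      · have hM : (rest.map (fun ns => ((ns.length : Int)))).foldl max (ns.length : Int)
            = (ns.length : Int) := le_antisymm hMd hdM
        rw [if_pos hMd, hM, if_neg (not_le.mpr hgt), PySem.List.index?_cons_self]
        simp
      · have hneM : ((ns.length : Int)) ≠
            (rest.map (fun ns => ((ns.length : Int)))).foldl max (ns.length : Int) := by omega
        rw [if_neg hMd, if_neg (by omega), PySem.List.index?_cons_of_ne _ hneM]
        cases hi : PySem.List.index? (rest.map (fun ns => ((ns.length : Int))))
            ((rest.map (fun ns => ((ns.length : Int)))).foldl max (ns.length : Int)) with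
        | none => simp [hi]
        | some k => simp [hi]; ring
    · have hmx : max high ((ns.length : Int)) = high := by omega
      have hhM : high ≤ (rest.map (fun ns => ((ns.length : Int)))).foldl max high :=
        (PySem.List.le_foldl_max _ _).1
      simp only [maxPass, if_neg hgt, List.map_cons, List.foldl_cons, hmx]
      rw [ih (v + 1) high best h0]
      by_cases hMh : (rest.map (fun ns => ((ns.length : Int)))).foldl max high ≤ high
      · simp [hMh]
      · have hneM : ((ns.length : Int)) ≠
            (rest.map (fun ns => ((ns.length : Int)))).foldl max high := by omega
        rw [if_neg hMh, if_neg hMh, PySem.List.index?_cons_of_ne _ hneM]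
        cases hi : PySem.List.index? (rest.map (fun ns => ((ns.length : Int))))
            ((rest.map (fun ns => ((ns.length : Int)))).foldl max high) with
        | none => simp [hi]
        | some k => simp [hi]; ring

-- ===== VERDICT (by name: the statement is the Claim_ definition above) =====
theorem choose_vertex_spec : Claim_equal_choose_vertex := by
  intro G _
  unfold Spec_choose_vertex
  rw [show choose_vertex G = chooseVertexLoop G 0 0 none from rfl, chooseVertexLoop_split]
  simp only [choose_vertex_alt]
  cases hidx : PySem.List.index? (G.map (fun ns => ((ns.length : Int)))) 1 with
  | some k =>
    have hmem : (1 : Int) ∈ G.map (fun ns => ((ns.length : Int))) := by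
      refine (PySem.List.index?_isSome_iff _ _).1 ?_
      rw [hidx]; rfl
    rw [if_pos hmem]
    simp
  | none =>
    have hmem : (1 : Int) ∉ G.map (fun ns => ((ns.length : Int))) :=
      (PySem.List.index?_eq_none_iff _ _).1 hidx
    rw [if_neg hmem, maxPass_char G 0 0 none le_rfl]
    cases G with
    | nil => simp [PySem.List.max?]
    | cons ns rest =>
      have hd0 : (0 : Int) ≤ (ns.length : Int) := Int.natCast_nonneg _
      have hmx : max (0 : Int) ((ns.length : Int)) = (ns.length : Int) := by omega
      have hM0 : (ns.length : Int) ≤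
          (rest.map (fun ns => ((ns.length : Int)))).foldl max (ns.length : Int) :=
        (PySem.List.le_foldl_max _ _).1
      simp only [List.map_cons, List.foldl_cons, hmx, PySem.List.max?_id_cons,
        Option.getD_some]
      by_cases hz : (rest.map (fun ns => ((ns.length : Int)))).foldl max (ns.length : Int) = 0
      · rw [if_pos (le_of_eq hz), if_pos hz]
      · rw [if_neg (by omega), if_neg hz]
        cases hi : PySem.List.index? (((ns.length : Int)) :: rest.map (fun ns => ((ns.length : Int))))
            ((rest.map (fun ns => ((ns.length : Int)))).foldl max (ns.length : Int)) with
        | none => simp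
        | some k => simp
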